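-- pv_equiv track=rewrite | github.com/francescomarino10/WDA | backup/backup 01 07 2022 2/funzioni_progetto_webdata.py | punteggi_LSA
-- ===== SOURCE A (Python) =====
-- def punteggi_LSA(concetti,parole):
--   punteggi=dict()
--
--   for key,lista in concetti.items():
--     punteggio=0
--     for i in parole:
--       for concetto_parola,valore in lista:
--         if(i == concetto_parola):
--           punteggio+=valore
--     punteggi[key]=punteggio
--   return punteggi
-- ===== SOURCE B (Python) =====
-- def punteggi_LSA(concetti, parole):
--     # Build a multiplicity table of the query words once, then make a single
--     # pass over each concept's (word, value) list, weighting by multiplicity.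
--     cnt = {}
--     for w in parole:
--         cnt[w] = cnt.get(w, 0) + 1
--     punteggi = {}
--     for key, lista in concetti.items():
--         punteggi[key] = sum(v * cnt.get(w, 0) for w, v in lista)
--     return punteggi
-- ===== Notes on version B (the rewrite author's own statement) =====
-- stated objective: faster
-- what changed: B precomputes a word-multiplicity dict from parole once and computes each concept's score in a single pass over its (word,value) list as sum(v*cnt[w]), instead of A's triple nested loop scanning parole for every concept.
import Mathlib
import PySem

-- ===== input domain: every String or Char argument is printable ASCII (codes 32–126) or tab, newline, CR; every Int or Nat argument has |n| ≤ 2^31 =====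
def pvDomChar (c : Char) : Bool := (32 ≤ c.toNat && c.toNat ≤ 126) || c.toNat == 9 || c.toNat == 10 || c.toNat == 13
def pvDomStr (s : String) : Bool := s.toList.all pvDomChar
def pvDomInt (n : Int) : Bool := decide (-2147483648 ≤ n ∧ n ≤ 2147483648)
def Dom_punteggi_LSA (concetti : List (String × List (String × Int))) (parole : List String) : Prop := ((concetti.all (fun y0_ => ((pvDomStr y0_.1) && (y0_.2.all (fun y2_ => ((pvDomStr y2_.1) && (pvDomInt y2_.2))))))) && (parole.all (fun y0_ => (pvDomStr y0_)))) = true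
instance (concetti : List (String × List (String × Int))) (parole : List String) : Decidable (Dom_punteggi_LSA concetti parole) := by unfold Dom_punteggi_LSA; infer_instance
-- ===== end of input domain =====

-- B builds a word-multiplicity dict from parole once and scores each concept in a
-- single pass over its pair list (sum of v * count), replacing A's triple nested loop.

-- ===== PORT A =====
-- for i in parole: for (concetto_parola, valore) in lista: if i == concetto_parola: punteggio += valore
def punteggi_LSA (concetti : List (String × List (String × Int))) (parole : List String) : List (String × Int) :=
  (concetti.foldl
    (fun (punteggi : PySem.Dict String Int) kv =>
      let punteggio : Int :=
        parole.foldl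
          (fun punteggio i =>
            kv.2.foldl
              (fun punteggio cv => if i == cv.1 then punteggio + cv.2 else punteggio)
              punteggio)
          0
      punteggi.insert kv.1 punteggio)
    PySem.Dict.empty).items

-- ===== PORT B =====
def punteggi_LSA_alt (concetti : List (String × List (String × Int))) (parole : List String) : List (String × Int) :=
  let cnt : PySem.Dict String Int :=
    parole.foldl (fun d w => d.insert w (d.getD w 0 + 1)) PySem.Dict.empty
  (concetti.foldl
    (fun (punteggi : PySem.Dict String Int) kv =>
      punteggi.insert kv.1 (kv.2.foldl (fun s cv => s + cv.2 * cnt.getD cv.1 0) 0))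
    PySem.Dict.empty).items

-- ===== PRECONDITION & SPEC =====
def Spec_punteggi_LSA (concetti : List (String × List (String × Int))) (parole : List String) (out : List (String × Int)) : Prop := out = punteggi_LSA_alt concetti parole
instance (concetti : List (String × List (String × Int))) (parole : List String) (out : List (String × Int)) : Decidable (Spec_punteggi_LSA concetti parole out) := by unfold Spec_punteggi_LSA; infer_instance

-- ===== CLAIM (what is proved, stated in full; the proofs are below) =====
def Claim_equal_punteggi_LSA : Prop := ∀ (concetti : List (String × List (String × Int))) (parole : List String), Dom_punteggi_LSA concetti parole → Spec_punteggi_LSA concetti parole (punteggi_LSA concetti parole)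

-- ===== LEMMAS AND PROOFS =====

-- A's inner two loops as a function of the accumulator: they ADD a fixed amount.
def pvInnerA (i : String) (lista : List (String × Int)) : Int :=
  lista.foldl (fun p cv => if i == cv.1 then p + cv.2 else p) 0

theorem pvInnerA_shift (i : String) (lista : List (String × Int)) (p : Int) :
    lista.foldl (fun p cv => if i == cv.1 then p + cv.2 else p) p = p + pvInnerA i lista := by
  induction lista generalizing p with
  | nil => simp [pvInnerA]
  | cons cv rest ih =>
    simp only [pvInnerA, List.foldl_cons] at *
    rw [ih, ih (if i == cv.1 then 0 + cv.2 else 0)]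
    split <;> omega

theorem pvOuterA_shift (lista : List (String × Int)) (parole : List String) (p : Int) :
    parole.foldl
      (fun punteggio i =>
        lista.foldl (fun punteggio cv => if i == cv.1 then punteggio + cv.2 else punteggio) punteggio)
      p
    = p + (parole.map (fun i => pvInnerA i lista)).sum := by
  induction parole generalizing p with
  | nil => simp
  | cons i rest ih =>
    simp only [List.foldl_cons, List.map_cons, List.sum_cons]
    rw [pvInnerA_shift, ih]; ring

theorem pvSum_if (parole : List String) (w : String) (v : Int) :
    (parole.map (fun i => if i == w then v else 0)).sum = v * (parole.count w : Int) := by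
  induction parole with
  | nil => simp
  | cons i rest ih =>
    by_cases h : i = w
    · subst h
      simp only [List.map_cons, List.sum_cons, List.count_cons, ih, beq_self_eq_true,
        if_true, Nat.cast_add, Nat.cast_ite, Nat.cast_one, Nat.cast_zero]
      ring
    · have hb : (i == w) = false := by simpa using h
      simp only [List.map_cons, List.sum_cons, List.count_cons, ih, hb, if_false]
      push_cast
      ring

-- Exchange of summation: summing A's per-word matches over parole equals
-- one pass over lista weighted by multiplicities.
theorem pvExchange (lista : List (String × Int)) (parole : List String) (s : Int) :
    lista.foldl (fun s cv => s + cv.2 * (parole.count cv.1 : Int)) s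
      = s + (parole.map (fun i => pvInnerA i lista)).sum := by
  induction lista generalizing s with
  | nil => simp [pvInnerA]
  | cons cv rest ih =>
    have hsplit : ∀ i, pvInnerA i (cv :: rest) = (if i == cv.1 then cv.2 else 0) + pvInnerA i rest := by
      intro i
      simp only [pvInnerA, List.foldl_cons]
      rw [pvInnerA_shift]
      simp only [pvInnerA]
      split <;> ring
    simp only [List.foldl_cons]
    rw [ih]
    simp only [hsplit]
    rw [List.sum_map_add, pvSum_if]
    ring

-- B's counter dict reads back the count of each word.
theorem pvCnt_getD (parole : List String) (w : String) :
    (parole.foldl (fun d x => d.insert x (d.getD x 0 + 1)) PySem.Dict.empty).getD w 0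
      = (parole.count w : Int) := by
  rw [PySem.Dict.getD_foldl_insert_add_one]
  simp

-- Per-concept scores coincide.
theorem pvScores_eq (lista : List (String × Int)) (parole : List String) :
    parole.foldl
      (fun punteggio i =>
        lista.foldl (fun punteggio cv => if i == cv.1 then punteggio + cv.2 else punteggio) punteggio) 0
    = lista.foldl
        (fun s cv => s + cv.2 *
          (parole.foldl (fun d w => d.insert w (d.getD w 0 + 1)) PySem.Dict.empty).getD cv.1 0) 0 := by
  rw [pvOuterA_shift]
  simp only [pvCnt_getD]
  rw [pvExchange]

-- The two dict-building folds agree from any starting dict.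
theorem pvFold_eq (parole : List String) (l : List (String × List (String × Int)))
    (d : PySem.Dict String Int) :
    l.foldl
      (fun punteggi kv =>
        punteggi.insert kv.1
          (parole.foldl
            (fun punteggio i =>
              kv.2.foldl (fun punteggio cv => if i == cv.1 then punteggio + cv.2 else punteggio) punteggio)
            0))
      d
    = l.foldl
        (fun punteggi kv =>
          punteggi.insert kv.1
            (kv.2.foldl
              (fun s cv => s + cv.2 *
                (parole.foldl (fun d w => d.insert w (d.getD w 0 + 1)) PySem.Dict.empty).getD cv.1 0)
              0))
        d := by
  induction l generalizing d with
  | nil => rfl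
  | cons kv rest ih =>
    simp only [List.foldl_cons]
    rw [pvScores_eq]
    exact ih _

-- ===== VERDICT (by name: the statement is the Claim_ definition above) =====
theorem punteggi_LSA_spec : Claim_equal_punteggi_LSA := by
  intro concetti parole _
  unfold Spec_punteggi_LSA punteggi_LSA punteggi_LSA_alt
  congr 1
  exact pvFold_eq parole concetti PySem.Dict.empty
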